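-- pv_equiv track=rewrite | github.com/PlantInGreenhouse/KGC | oie/framework.py | _evidence_hit
-- ===== SOURCE A (Python) =====
-- from typing import Dict, Any, Optional, List, Tuple
--
-- def _evidence_hit(s: str, o: str, atomic: List[str]) -> bool:
--     s = (s or "").strip()
--     o = (o or "").strip()
--     if not s or not o or not atomic:
--         return False
--
--     same = any((s in af and o in af) for af in atomic)
--     if same:
--         return True
--
--     has_s = any(s in af for af in atomic)
--     has_o = any(o in af for af in atomic)
--     return has_s and has_o
-- ===== SOURCE B (Python) =====
-- def _evidence_hit(s, o, atomic):
--     s = (s or "").strip()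
--     o = (o or "").strip()
--     if not s or not o or not atomic:
--         return False
--     has_s = False
--     has_o = False
--     for af in atomic:
--         in_s = s in af
--         in_o = o in af
--         if in_s and in_o:
--             return True
--         has_s = has_s or in_s
--         has_o = has_o or in_o
--     return has_s and has_o
-- ===== Notes on version B (the rewrite author's own statement) =====
-- stated objective: alternative
-- what changed: Replaces A's three separate any() scans over atomic with a single pass that maintains has_s/has_o flags and returns True immediately when both substrings occur in the same fact.
import Mathlib
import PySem

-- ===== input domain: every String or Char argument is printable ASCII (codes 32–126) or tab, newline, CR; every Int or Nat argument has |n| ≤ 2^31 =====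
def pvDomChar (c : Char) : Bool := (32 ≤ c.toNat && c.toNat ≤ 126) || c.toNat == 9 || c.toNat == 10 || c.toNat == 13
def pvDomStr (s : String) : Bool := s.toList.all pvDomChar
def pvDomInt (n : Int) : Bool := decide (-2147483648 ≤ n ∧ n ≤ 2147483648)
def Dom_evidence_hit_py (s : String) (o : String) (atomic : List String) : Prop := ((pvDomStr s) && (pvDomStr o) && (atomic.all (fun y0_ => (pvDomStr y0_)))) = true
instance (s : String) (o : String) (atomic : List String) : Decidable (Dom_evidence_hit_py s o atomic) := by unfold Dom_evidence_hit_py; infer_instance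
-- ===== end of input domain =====

-- B replaces A's three separate any() scans with one pass keeping has_s/has_o flags and an
-- early True on same-fact co-occurrence (alternative decomposition; same semantics).

-- ===== PORT A =====
def evidence_hit_py (s : String) (o : String) (atomic : List String) : Bool :=
  let s := PySem.Str.strip s
  let o := PySem.Str.strip o
  if s = "" || o = "" || atomic = [] then false
  else
    let same := atomic.any (fun af => PySem.Str.isIn s af && PySem.Str.isIn o af)
    if same then true
    else
      let has_s := atomic.any (fun af => PySem.Str.isIn s af)
      let has_o := atomic.any (fun af => PySem.Str.isIn o af)
      has_s && has_o

-- ===== PORT B =====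
-- the single for-loop of Source B, with the two flags as accumulators
def evidenceLoop (s o : String) : List String → Bool → Bool → Bool
  | [], has_s, has_o => has_s && has_o
  | af :: rest, has_s, has_o =>
    let in_s := PySem.Str.isIn s af
    let in_o := PySem.Str.isIn o af
    if in_s && in_o then true
    else evidenceLoop s o rest (has_s || in_s) (has_o || in_o)

def evidence_hit_py_alt (s : String) (o : String) (atomic : List String) : Bool :=
  let s := PySem.Str.strip s
  let o := PySem.Str.strip o
  if s = "" || o = "" || atomic = [] then false
  else evidenceLoop s o atomic false false

-- ===== PRECONDITION & SPEC =====
def Spec_evidence_hit_py (s : String) (o : String) (atomic : List String) (out : Bool) : Prop := out = evidence_hit_py_alt s o atomic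
instance (s : String) (o : String) (atomic : List String) (out : Bool) : Decidable (Spec_evidence_hit_py s o atomic out) := by unfold Spec_evidence_hit_py; infer_instance

-- ===== CLAIM (what is proved, stated in full; the proofs are below) =====
def Claim_equal_evidence_hit_py : Prop := ∀ (s : String) (o : String) (atomic : List String), Dom_evidence_hit_py s o atomic → Spec_evidence_hit_py s o atomic (evidence_hit_py s o atomic)

-- ===== LEMMAS AND PROOFS =====
theorem evidenceLoop_eq (s o : String) (l : List String) (hs ho : Bool) :
    evidenceLoop s o l hs ho =
      (l.any (fun af => PySem.Str.isIn s af && PySem.Str.isIn o af) ||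
        ((hs || l.any (fun af => PySem.Str.isIn s af)) &&
         (ho || l.any (fun af => PySem.Str.isIn o af)))) := by
  induction l generalizing hs ho with
  | nil => simp [evidenceLoop]
  | cons af rest ih =>
    simp only [evidenceLoop, ih, List.any_cons]
    cases PySem.Str.isIn s af <;> cases PySem.Str.isIn o af <;> cases hs <;> cases ho <;> simp

-- ===== VERDICT (by name: the statement is the Claim_ definition above) =====
theorem evidence_hit_py_spec : Claim_equal_evidence_hit_py := by
  intro s o atomic _
  unfold Spec_evidence_hit_py evidence_hit_py evidence_hit_py_alt
  simp only [evidenceLoop_eq, Bool.false_or]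
  split
  · rfl
  · split <;> simp_all
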